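-- pv_equiv track=rewrite | github.com/Freedomformfree/Call-center- | core-api/agentic_function_manager.py | _get_function_category
-- ===== SOURCE A (Python) =====
-- def _get_function_category(function_name: str) -> str:
--     """Определение категории функции."""
--
--     categories = {
--         'communication': ['email_sender', 'sms_bulk_sender', 'telegram_bot_sender', 'whatsapp_sender', 'social_media_poster'],
--         'finance': ['cryptocurrency_tracker', 'stock_market_analyzer', 'forex_tracker', 'payment_processor'],
--         'travel': ['flight_booking', 'hotel_booking', 'ride_booking'],
--         'health': ['fitness_tracker', 'nutrition_tracker'],
--         'education': ['language_learning', 'skill_assessment'],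
--         'real_estate': ['property_search', 'property_valuation'],
--         'legal': ['contract_analyzer', 'compliance_checker'],
--         'entertainment': ['game_recommendation', 'movie_recommendation'],
--         'security': ['security_scanner', 'password_generator'],
--         'data': ['data_analyzer', 'web_scraper'],
--         'content': ['content_generator', 'image_generator'],
--         'automation': ['file_organizer', 'task_scheduler']
--     }
--
--     for category, functions in categories.items():
--         if function_name in functions:
--             return category
--
--     return 'other'
-- ===== SOURCE B (Python) =====
-- _FUNCTION_CATEGORY = {
--     'email_sender': 'communication', 'sms_bulk_sender': 'communication',
--     'telegram_bot_sender': 'communication', 'whatsapp_sender': 'communication',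
--     'social_media_poster': 'communication',
--     'cryptocurrency_tracker': 'finance', 'stock_market_analyzer': 'finance',
--     'forex_tracker': 'finance', 'payment_processor': 'finance',
--     'flight_booking': 'travel', 'hotel_booking': 'travel', 'ride_booking': 'travel',
--     'fitness_tracker': 'health', 'nutrition_tracker': 'health',
--     'language_learning': 'education', 'skill_assessment': 'education',
--     'property_search': 'real_estate', 'property_valuation': 'real_estate',
--     'contract_analyzer': 'legal', 'compliance_checker': 'legal',
--     'game_recommendation': 'entertainment', 'movie_recommendation': 'entertainment',
--     'security_scanner': 'security', 'password_generator': 'security',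
--     'data_analyzer': 'data', 'web_scraper': 'data',
--     'content_generator': 'content', 'image_generator': 'content',
--     'file_organizer': 'automation', 'task_scheduler': 'automation',
-- }
--
-- def _get_function_category(function_name: str) -> str:
--     """Определение категории функции."""
--     return _FUNCTION_CATEGORY.get(function_name, 'other')
-- ===== Notes on version B (the rewrite author's own statement) =====
-- stated objective: simpler
-- what changed: Replaced the loop over categories with membership scans of each category's list by a single precomputed inverted dictionary mapping every function name to its category, so the answer is one dict lookup with the same default for unknown names.
import Mathlib
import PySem

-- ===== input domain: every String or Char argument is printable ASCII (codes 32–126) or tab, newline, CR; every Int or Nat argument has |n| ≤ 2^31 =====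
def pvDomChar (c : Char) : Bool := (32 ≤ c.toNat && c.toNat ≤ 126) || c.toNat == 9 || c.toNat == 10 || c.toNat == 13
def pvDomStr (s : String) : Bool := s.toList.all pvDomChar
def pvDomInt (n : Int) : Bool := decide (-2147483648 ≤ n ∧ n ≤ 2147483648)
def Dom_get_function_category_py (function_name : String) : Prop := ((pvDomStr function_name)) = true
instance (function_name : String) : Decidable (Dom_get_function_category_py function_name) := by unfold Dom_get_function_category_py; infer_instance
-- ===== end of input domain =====

-- B replaces A's loop over categories with membership tests by one precomputed
-- inverted name→category dictionary looked up once with default 'other' (objective: simpler).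

-- ===== PORT A =====
-- the nested dict literal of A, as an insertion-ordered association list
def pvCategories : List (String × List String) :=
  [ ("communication", ["email_sender", "sms_bulk_sender", "telegram_bot_sender", "whatsapp_sender", "social_media_poster"]),
    ("finance", ["cryptocurrency_tracker", "stock_market_analyzer", "forex_tracker", "payment_processor"]),
    ("travel", ["flight_booking", "hotel_booking", "ride_booking"]),
    ("health", ["fitness_tracker", "nutrition_tracker"]),
    ("education", ["language_learning", "skill_assessment"]),
    ("real_estate", ["property_search", "property_valuation"]),
    ("legal", ["contract_analyzer", "compliance_checker"]),
    ("entertainment", ["game_recommendation", "movie_recommendation"]),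
    ("security", ["security_scanner", "password_generator"]),
    ("data", ["data_analyzer", "web_scraper"]),
    ("content", ["content_generator", "image_generator"]),
    ("automation", ["file_organizer", "task_scheduler"]) ]

-- the 'for category, functions in categories.items(): if function_name in functions: return category' loop
def pvCatLoop (function_name : String) : List (String × List String) → String
  | [] => "other"
  | (category, functions) :: rest =>
      if functions.contains function_name then category else pvCatLoop function_name rest

def get_function_category_py (function_name : String) : String :=
  pvCatLoop function_name pvCategories

-- ===== PORT B =====
-- B's precomputed flat dict name → category
def pvFunctionCategory : PySem.Dict String String :=
  PySem.Dict.ofList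
    [ ("email_sender", "communication"), ("sms_bulk_sender", "communication"),
      ("telegram_bot_sender", "communication"), ("whatsapp_sender", "communication"),
      ("social_media_poster", "communication"),
      ("cryptocurrency_tracker", "finance"), ("stock_market_analyzer", "finance"),
      ("forex_tracker", "finance"), ("payment_processor", "finance"),
      ("flight_booking", "travel"), ("hotel_booking", "travel"), ("ride_booking", "travel"),
      ("fitness_tracker", "health"), ("nutrition_tracker", "health"),
      ("language_learning", "education"), ("skill_assessment", "education"),
      ("property_search", "real_estate"), ("property_valuation", "real_estate"),
      ("contract_analyzer", "legal"), ("compliance_checker", "legal"),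
      ("game_recommendation", "entertainment"), ("movie_recommendation", "entertainment"),
      ("security_scanner", "security"), ("password_generator", "security"),
      ("data_analyzer", "data"), ("web_scraper", "data"),
      ("content_generator", "content"), ("image_generator", "content"),
      ("file_organizer", "automation"), ("task_scheduler", "automation") ]

def get_function_category_py_alt (function_name : String) : String :=
  pvFunctionCategory.getD function_name "other"

-- ===== PRECONDITION & SPEC =====
def Spec_get_function_category_py (function_name : String) (out : String) : Prop := out = get_function_category_py_alt function_name
instance (function_name : String) (out : String) : Decidable (Spec_get_function_category_py function_name out) := by unfold Spec_get_function_category_py; infer_instance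

-- ===== CLAIM (what is proved, stated in full; the proofs are below) =====
def Claim_equal_get_function_category_py : Prop := ∀ (function_name : String), Dom_get_function_category_py function_name → Spec_get_function_category_py function_name (get_function_category_py function_name)

-- ===== LEMMAS AND PROOFS =====
-- all function names appearing in either table
-- the closed dict literal evaluated once, so get?_mk_cons applies
theorem pvDict_eval : pvFunctionCategory = PySem.Dict.mk [ ("email_sender", "communication"), ("sms_bulk_sender", "communication"), ("telegram_bot_sender", "communication"), ("whatsapp_sender", "communication"), ("social_media_poster", "communication"), ("cryptocurrency_tracker", "finance"), ("stock_market_analyzer", "finance"), ("forex_tracker", "finance"), ("payment_processor", "finance"), ("flight_booking", "travel"), ("hotel_booking", "travel"), ("ride_booking", "travel"), ("fitness_tracker", "health"), ("nutrition_tracker", "health"), ("language_learning", "education"), ("skill_assessment", "education"), ("property_search", "real_estate"), ("property_valuation", "real_estate"), ("contract_analyzer", "legal"), ("compliance_checker", "legal"), ("game_recommendation", "entertainment"), ("movie_recommendation", "entertainment"), ("security_scanner", "security"), ("password_generator", "security"), ("data_analyzer", "data"), ("web_scraper", "data"), ("content_generator", "content"), ("image_generator", "content"), ("file_organizer", "automation"),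 ("task_scheduler", "automation") ] := by decide

def pvAllNames : List String := ["email_sender", "sms_bulk_sender", "telegram_bot_sender", "whatsapp_sender", "social_media_poster", "cryptocurrency_tracker", "stock_market_analyzer", "forex_tracker", "payment_processor", "flight_booking", "hotel_booking", "ride_booking", "fitness_tracker", "nutrition_tracker", "language_learning", "skill_assessment", "property_search", "property_valuation", "contract_analyzer", "compliance_checker", "game_recommendation", "movie_recommendation", "security_scanner", "password_generator", "data_analyzer", "web_scraper", "content_generator", "image_generator", "file_organizer", "task_scheduler"]

theorem pv_eq (n : String) : get_function_category_py n = get_function_category_py_alt n := by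
  by_cases h : n ∈ pvAllNames
  · simp only [pvAllNames, List.mem_cons, List.not_mem_nil, or_false] at h
    rcases h with rfl | rfl | rfl | rfl | rfl | rfl | rfl | rfl | rfl | rfl | rfl | rfl | rfl | rfl | rfl | rfl | rfl | rfl | rfl | rfl | rfl | rfl | rfl | rfl | rfl | rfl | rfl | rfl | rfl | rfl <;> decide
  · simp only [pvAllNames, List.mem_cons, List.not_mem_nil, or_false, not_or] at h
    obtain ⟨h0, h1, h2, h3, h4, h5, h6, h7, h8, h9, h10, h11, h12, h13, h14, h15, h16, h17, h18, h19, h20, h21, h22, h23, h24, h25, h26, h27, h28, h29⟩ := h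
    simp [get_function_category_py, get_function_category_py_alt, pvCatLoop, pvCategories,
      pvDict_eval, PySem.Dict.getD_eq_get?_getD, PySem.Dict.get?,
      h0, h1, h2, h3, h4, h5, h6, h7, h8, h9, h10, h11, h12, h13, h14, h15, h16, h17, h18, h19, h20, h21, h22, h23, h24, h25, h26, h27, h28, h29, Ne.symm h0, Ne.symm h1, Ne.symm h2, Ne.symm h3, Ne.symm h4, Ne.symm h5, Ne.symm h6, Ne.symm h7, Ne.symm h8, Ne.symm h9, Ne.symm h10, Ne.symm h11, Ne.symm h12, Ne.symm h13, Ne.symm h14, Ne.symm h15, Ne.symm h16, Ne.symm h17, Ne.symm h18, Ne.symm h19, Ne.symm h20, Ne.symm h21, Ne.symm h22, Ne.symm h23, Ne.symm h24, Ne.symm h25, Ne.symm h26, Ne.symm h27, Ne.symm h28, Ne.symm h29]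

-- ===== VERDICT (by name: the statement is the Claim_ definition above) =====
theorem get_function_category_py_spec : Claim_equal_get_function_category_py := by
  intro n _
  exact pv_eq n
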